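-- pv_equiv track=rewrite | github.com/andyalexander/galaxypi | utils.py | calcParity
-- ===== SOURCE A (Python) =====
-- def calcParity(mess):
--     tmp = 0xAA
--     bSum = int(sum(mess) + tmp)
--     h = hex(bSum)
--     l = len(h[2:])
--     padded = h[2:].zfill(l % 2 + l)
--
--     tmp = 0
--     for start in list(range(0, len(padded) - 1, 2)):
--         tmp += int(padded[start:start + 2], 16)
--
--     return tmp % 256
-- ===== SOURCE B (Python) =====
-- def calcParity(mess):
--     # Sum the base-256 digits of the checksum base arithmetically instead of
--     # parsing a zero-padded hex string pair by pair.
--     bSum = int(sum(mess) + 0xAA)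
--     tmp = 0
--     while bSum > 0:
--         tmp += bSum & 0xFF
--         bSum >>= 8
--     return tmp % 256
-- ===== Notes on version B (the rewrite author's own statement) =====
-- stated objective: idiomatic
-- what changed: Replaces the hex(), zfill and two-character string-slice parsing fold with a direct arithmetic loop that accumulates the base-256 digits via bSum & 0xFF and bSum >>= 8.
import Mathlib
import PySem

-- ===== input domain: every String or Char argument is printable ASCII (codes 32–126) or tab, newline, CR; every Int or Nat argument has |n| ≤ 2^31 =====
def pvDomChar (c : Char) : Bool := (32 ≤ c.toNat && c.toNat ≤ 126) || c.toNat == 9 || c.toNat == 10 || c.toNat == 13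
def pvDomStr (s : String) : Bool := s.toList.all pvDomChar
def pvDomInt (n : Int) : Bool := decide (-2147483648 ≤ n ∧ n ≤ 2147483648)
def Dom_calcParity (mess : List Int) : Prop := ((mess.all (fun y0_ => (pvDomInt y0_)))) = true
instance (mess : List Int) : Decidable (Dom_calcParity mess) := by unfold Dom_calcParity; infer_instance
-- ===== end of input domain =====

-- B replaces A's hex-string build / zfill / pair-slice parsing by a direct arithmetic
-- loop over the base-256 digits (idiomatic; same asymptotic cost).

-- ===== PORT A =====

-- lowercase hex digit character, as Python's hex() produces
def hexDigit (k : Nat) : Char := if k < 10 then Char.ofNat (48 + k) else Char.ofNat (87 + k)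

-- value of one hex character as int(·,16) reads it; a non-hex character (where
-- Python raises ValueError, possible only outside Pre_) is given value 0
def hexVal (c : Char) : Int :=
  if 48 ≤ c.toNat ∧ c.toNat ≤ 57 then (c.toNat : Int) - 48
  else if 97 ≤ c.toNat ∧ c.toNat ≤ 102 then (c.toNat : Int) - 87
  else if 65 ≤ c.toNat ∧ c.toNat ≤ 70 then (c.toNat : Int) - 55
  else 0

-- int(s, 16) on a string of hex digits (exact there; sign/whitespace never occur here)
def pyIntHex (cs : List Char) : Int := cs.foldl (fun acc c => acc * 16 + hexVal c) 0

-- hex digits of a nonnegative number, most significant first (hex(0) gives "0")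
def natHex (n : Nat) : List Char :=
  if _h : n < 16 then [hexDigit n]
  else natHex (n / 16) ++ [hexDigit (n % 16)]
  decreasing_by exact Nat.div_lt_self (by omega) (by omega)

-- Python hex(n) as a character list
def pyHex (n : Int) : List Char :=
  if n < 0 then '-' :: '0' :: 'x' :: natHex (-n).toNat else '0' :: 'x' :: natHex n.toNat

-- str.zfill(w) for strings without a leading sign (h[2:] never has one)
def pyZfill (s : List Char) (w : Nat) : List Char := List.replicate (w - s.length) '0' ++ s

def calcParity (mess : List Int) : Int :=
  let tmp : Int := 0xAA
  let bSum : Int := mess.sum + tmp          -- int(...) is identity on an int sum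
  let h : List Char := pyHex bSum
  let s : List Char := PySem.List.slice h (some 2) none   -- h[2:]
  let l : Nat := s.length
  let padded : List Char := pyZfill s (l % 2 + l)
  let tmp2 : Int :=
    (PySem.List.pyRange 0 ((padded.length : Int) - 1) 2).foldl
      (fun t start => t + pyIntHex (PySem.List.slice padded (some start) (some (start + 2)))) 0
  PySem.Int.mod tmp2 256

-- ===== PORT B =====

-- `while bSum > 0: tmp += bSum & 0xFF; bSum >>= 8`
-- (Python's  n & 0xFF  is  n mod 256  and  n >> 8  is  n // 256, exactly)
def bDigits (bSum : Int) (tmp : Int) : Int :=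
  if _h : 0 < bSum then
    bDigits (PySem.Int.floordiv bSum 256) (tmp + PySem.Int.mod bSum 256)
  else tmp
  termination_by bSum.toNat
  decreasing_by
    rw [PySem.Int.floordiv_eq_ediv_of_pos (by omega)]
    omega

def calcParity_alt (mess : List Int) : Int :=
  let bSum : Int := mess.sum + 0xAA
  PySem.Int.mod (bDigits bSum 0) 256

-- ===== PRECONDITION & SPEC =====
-- Pre_ excludes exactly the inputs where A raises: if sum(mess) + 0xAA < 0 the slice
-- hex(bSum)[2:] starts with 'x' and int(·, 16) raises ValueError.
def Pre_calcParity (mess : List Int) : Prop := 0 ≤ mess.sum + 170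
instance (mess : List Int) : Decidable (Pre_calcParity mess) := by unfold Pre_calcParity; infer_instance
def pvWitness_calcParity : List Int := [86, 1000]

def Spec_calcParity (mess : List Int) (out : Int) : Prop := out = calcParity_alt mess
instance (mess : List Int) (out : Int) : Decidable (Spec_calcParity mess out) := by unfold Spec_calcParity; infer_instance

-- ===== CLAIM (what is proved, stated in full; the proofs are below) =====
def Claim_equal_calcParity : Prop := ∀ (mess : List Int), Dom_calcParity mess → Pre_calcParity mess → Spec_calcParity mess (calcParity mess)

-- ===== LEMMAS AND PROOFS =====

-- sum of the base-256 digits of n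
def digitSum (n : Nat) : Nat :=
  if h : n = 0 then 0 else n % 256 + digitSum (n / 256)
  decreasing_by exact Nat.div_lt_self (by omega) (by omega)

-- what A's fold computes on an even-length string: sum of the values of its 2-char chunks
def chunkVals (s : List Char) : Int :=
  ((List.range (s.length / 2)).map (fun k => pyIntHex ((s.drop (2 * k)).take 2))).sum

-- left zero-padding to even length, what zfill(l % 2 + l) does
def padC (s : List Char) : List Char := List.replicate (s.length % 2) '0' ++ s

theorem hexVal_hexDigit (k : Nat) (hk : k < 16) : hexVal (hexDigit k) = (k : Int) := by
  interval_cases k <;> decide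

theorem chunkVals_append (s : List Char) (a b : Char) (hs : s.length % 2 = 0) :
    chunkVals (s ++ [a, b]) = chunkVals s + pyIntHex [a, b] := by
  unfold chunkVals
  have hlen : (s ++ [a, b]).length / 2 = s.length / 2 + 1 := by
    simp only [List.length_append, List.length_cons, List.length_nil]
    omega
  rw [hlen, List.range_succ, List.map_append, List.sum_append]
  congr 1
  · apply congrArg List.sum
    apply List.map_congr_left
    intro k hk
    have hk' : k < s.length / 2 := List.mem_range.mp hk
    have h2 : 2 * k + 2 ≤ s.length := by omega
    have ht : 2 ≤ (s.drop (2 * k)).length := by simp; omega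
    rw [List.drop_append_of_le_length (by omega), List.take_append_of_le_length ht]
  · have hd : (s ++ [a, b]).drop (2 * (s.length / 2)) = [a, b] := by
      rw [show 2 * (s.length / 2) = s.length by omega]
      simp
    simp [hd]

theorem padC_append (s : List Char) (a b : Char) :
    padC (s ++ [a, b]) = padC s ++ [a, b] := by
  unfold padC
  have : (s ++ [a, b]).length % 2 = s.length % 2 := by
    simp only [List.length_append, List.length_cons, List.length_nil]
    omega
  rw [this, List.append_assoc]

theorem length_padC_even (s : List Char) : (padC s).length % 2 = 0 := by
  unfold padC; simp; omega

theorem digitSum_step (n : Nat) (h0 : n ≠ 0) : digitSum n = n % 256 + digitSum (n / 256) := by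
  conv_lhs => rw [digitSum]
  rw [dif_neg h0]

theorem digitSum_small (n : Nat) (h : n < 256) : digitSum n = n := by
  by_cases h0 : n = 0
  · simp [h0, digitSum]
  · rw [digitSum_step n h0, show n / 256 = 0 by omega, show digitSum 0 = 0 by simp [digitSum]]
    omega

theorem natHex_padC_chunkVals (n : Nat) : chunkVals (padC (natHex n)) = (digitSum n : Int) := by
  induction n using Nat.strong_induction_on with
  | _ n ih =>
    by_cases h16 : n < 16
    · rw [natHex]
      simp only [h16, dite_true]
      unfold padC chunkVals
      simp only [List.length_cons, List.length_nil, List.length_append, List.length_replicate]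
      norm_num [List.range_succ, pyIntHex]
      rw [hexVal_hexDigit n h16, digitSum_small n (by omega),
          show hexVal '0' = 0 by decide]
      omega
    · by_cases h256 : n < 256
      · -- two hex digits, already even
        rw [natHex]
        simp only [h16, dite_false]
        rw [natHex]
        have hlt : n / 16 < 16 := by omega
        simp only [hlt, dite_true]
        unfold padC chunkVals
        norm_num [List.range_succ, pyIntHex]
        rw [hexVal_hexDigit _ hlt, hexVal_hexDigit _ (by omega : n % 16 < 16),
            digitSum_small n (by omega)]
        omega
      · -- n ≥ 256 : peel the two low hex digits
        have hsplit : natHex n = natHex (n / 256) ++ [hexDigit (n / 16 % 16), hexDigit (n % 16)] := by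
          rw [natHex]
          simp only [h16, dite_false]
          rw [natHex]
          have h16' : ¬ n / 16 < 16 := by omega
          simp only [h16', dite_false]
          have : n / 16 / 16 = n / 256 := by
            rw [Nat.div_div_eq_div_mul]
          rw [this, List.append_assoc]
          rfl
        rw [hsplit, padC_append, chunkVals_append _ _ _ (length_padC_even _),
            ih (n / 256) (by omega)]
        have hv : pyIntHex [hexDigit (n / 16 % 16), hexDigit (n % 16)] = ((n % 256 : Nat) : Int) := by
          simp [pyIntHex, hexVal_hexDigit _ (by omega : n / 16 % 16 < 16),
                hexVal_hexDigit _ (by omega : n % 16 < 16)]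
          have h1 : (n : Int) % 256 = (n % 16 : Nat) + 16 * ((n / 16 % 16 : Nat)) := by
            push_cast
            omega
          omega
        rw [hv, digitSum_step n (by omega)]
        push_cast
        ring

theorem bDigits_eq (n : Nat) : ∀ tmp : Int, bDigits (n : Int) tmp = tmp + (digitSum n : Int) := by
  induction n using Nat.strong_induction_on with
  | _ n ih =>
    intro tmp
    rw [bDigits]
    by_cases h0 : n = 0
    · subst h0; simp [digitSum]
    · have hpos : (0 : Int) < (n : Int) := by exact_mod_cast Nat.pos_of_ne_zero h0
      simp only [hpos, dite_true]
      rw [PySem.Int.floordiv_eq_ediv_of_pos (by omega), PySem.Int.mod_eq_emod_of_pos (by omega)]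
      have hd : (n : Int) / 256 = ((n / 256 : Nat) : Int) := by omega
      have hm : (n : Int) % 256 = ((n % 256 : Nat) : Int) := by omega
      rw [hd, hm, ih (n / 256) (Nat.div_lt_self (Nat.pos_of_ne_zero h0) (by omega))]
      rw [digitSum_step n h0]
      push_cast
      ring

-- A's pyRange/slice fold over the padded string equals the chunk sum
theorem fold_eq_chunkVals (padded : List Char) (hev : padded.length % 2 = 0) :
    (PySem.List.pyRange 0 ((padded.length : Int) - 1) 2).foldl
      (fun t start => t + pyIntHex (PySem.List.slice padded (some start) (some (start + 2)))) 0
    = chunkVals padded := by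
  rw [PySem.List.pyRange_of_pos 0 _ (by omega : (0:Int) < 2)]
  have hcount : (if (0:Int) < (padded.length : Int) - 1 then
      (((padded.length : Int) - 1 - 0 + 2 - 1) / 2).toNat else 0) = padded.length / 2 := by
    split_ifs with h
    · omega
    · omega
  rw [hcount, List.foldl_map]
  rw [PySem.List.foldl_add]
  unfold chunkVals
  simp only [Int.zero_add]
  congr 1
  apply List.map_congr_left
  intro k hk
  have h1 : (0 : Int) + 2 * (k : Int) = ((2 * k : Nat) : Int) := by push_cast; ring
  have h2 : ((2 * k : Nat) : Int) + 2 = (((2 * k + 2 : Nat)) : Int) := by push_cast; ring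
  rw [show (2 : Int) * (k : Int) = ((2 * k : Nat) : Int) by push_cast; ring]
  rw [h2, PySem.List.slice_natCast, show 2 * k + 2 - 2 * k = 2 from by omega]

-- ===== VERDICT (by name: the statement is the Claim_ definition above) =====
theorem calcParity_spec : Claim_equal_calcParity := by
  intro mess _hdom hpre
  unfold Pre_calcParity at hpre
  unfold Spec_calcParity calcParity calcParity_alt
  have hb : mess.sum + 0xAA = ((mess.sum + 170).toNat : Int) := by omega
  simp only []
  rw [hb]
  set n : Nat := (mess.sum + 170).toNat with hn
  -- A side
  have hhex : pyHex ((n : Int)) = '0' :: 'x' :: natHex n := by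
    unfold pyHex
    have : ¬ ((n : Int) < 0) := by omega
    simp [this]
  rw [hhex]
  have hslice : PySem.List.slice ('0' :: 'x' :: natHex n) (some 2) none = natHex n := by
    rw [PySem.List.slice_from _ (show (0:Int) ≤ 2 by omega)]
    rfl
  rw [hslice]
  have hz : pyZfill (natHex n) ((natHex n).length % 2 + (natHex n).length) = padC (natHex n) := by
    unfold pyZfill padC
    rw [Nat.add_sub_cancel]
  rw [hz]
  rw [fold_eq_chunkVals _ (length_padC_even _), natHex_padC_chunkVals]
  rw [bDigits_eq n 0]
  rw [Int.zero_add]
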